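-- pv_equiv track=rewrite | github.com/SorPuti/core-framework | core/admin/options.py | _detect_widget
-- ===== SOURCE A (Python) =====
-- def _detect_widget(col_name: str, field_type: str, all_columns: list[str]) -> str:
--     """
--     Detecta o widget ideal para um campo baseado no nome e tipo.
--
--     Retorna um string que o frontend usa para decidir qual
--     componente de input renderizar.
--     """
--     name = col_name.lower()
--
--     # Password fields — hash ou plain
--     if name in ("password_hash", "hashed_password", "password_digest"):
--         return "password_hash"
--     if name in ("password", "passwd", "pwd", "new_password"):
--         return "password"
--
--     # Secret/token fields — nunca exibir
--     if any(s in name for s in ("_secret", "_token", "_key", "api_key", "secret_key")):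
--         if name not in ("is_active", "primary_key"):
--             return "secret"
--     if name.endswith("_hash") and "password" not in name:
--         return "secret"
--
--     # Slug
--     if name == "slug" or name.endswith("_slug"):
--         return "slug"
--
--     # Email
--     if name == "email" or name.endswith("_email") or name == "email_address":
--         return "email"
--
--     # URL
--     if name in ("url", "website", "homepage", "avatar_url", "image_url", "photo_url"):
--         return "url"
--     if name.endswith("_url") or name.endswith("_link"):
--         return "url"
--
--     # Color
--     if name in ("color", "hex_color", "bg_color", "text_color", "background_color"):
--         return "color"
--     if name.endswith("_color"):
--         return "color"
--
--     # IP Address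
--     if name in ("ip_address", "ip", "remote_ip", "client_ip"):
--         return "ip"
--
--     return "default"
-- ===== SOURCE B (Python) =====
-- # Candidate-scoring rewrite: every rule that matches contributes a (priority, label)
-- # candidate; the answer is the label of the minimum-priority candidate.  Exact-name
-- # rules collapse to one dict lookup.
--
-- _EXACT = {
--     "password_hash": (1, "password_hash"), "hashed_password": (1, "password_hash"),
--     "password_digest": (1, "password_hash"),
--     "password": (2, "password"), "passwd": (2, "password"),
--     "pwd": (2, "password"), "new_password": (2, "password"),
--     "slug": (5, "slug"),
--     "email": (6, "email"), "email_address": (6, "email"),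
--     "url": (7, "url"), "website": (7, "url"), "homepage": (7, "url"),
--     "avatar_url": (7, "url"), "image_url": (7, "url"), "photo_url": (7, "url"),
--     "color": (9, "color"), "hex_color": (9, "color"), "bg_color": (9, "color"),
--     "text_color": (9, "color"), "background_color": (9, "color"),
--     "ip_address": (11, "ip"), "ip": (11, "ip"),
--     "remote_ip": (11, "ip"), "client_ip": (11, "ip"),
-- }
--
-- _SUFFIX = [("_slug", 5, "slug"), ("_email", 6, "email"), ("_url", 8, "url"),
--            ("_link", 8, "url"), ("_color", 10, "color")]
--
--
-- def _detect_widget(col_name: str, field_type: str, all_columns: list[str]) -> str: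
--     name = col_name.lower()
--     cands = []
--     hit = _EXACT.get(name)
--     if hit is not None:
--         cands.append(hit)
--     if any(s in name for s in ("_secret", "_token", "_key", "api_key", "secret_key")) \
--             and name not in ("is_active", "primary_key"):
--         cands.append((3, "secret"))
--     if name.endswith("_hash") and "password" not in name:
--         cands.append((4, "secret"))
--     for suf, prio, label in _SUFFIX:
--         if name.endswith(suf):
--             cands.append((prio, label))
--     return min(cands)[1] if cands else "default"
-- ===== Notes on version B (the rewrite author's own statement) =====
-- stated objective: alternative
-- what changed: Replaces the early-return if-cascade with candidate scoring: all exact-name rules become a single dict lookup, suffix/substring rules each append a (priority,label) candidate, and the result is the label of the minimum-priority candidate (no early exit, different control flow and data structure).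
import Mathlib
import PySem

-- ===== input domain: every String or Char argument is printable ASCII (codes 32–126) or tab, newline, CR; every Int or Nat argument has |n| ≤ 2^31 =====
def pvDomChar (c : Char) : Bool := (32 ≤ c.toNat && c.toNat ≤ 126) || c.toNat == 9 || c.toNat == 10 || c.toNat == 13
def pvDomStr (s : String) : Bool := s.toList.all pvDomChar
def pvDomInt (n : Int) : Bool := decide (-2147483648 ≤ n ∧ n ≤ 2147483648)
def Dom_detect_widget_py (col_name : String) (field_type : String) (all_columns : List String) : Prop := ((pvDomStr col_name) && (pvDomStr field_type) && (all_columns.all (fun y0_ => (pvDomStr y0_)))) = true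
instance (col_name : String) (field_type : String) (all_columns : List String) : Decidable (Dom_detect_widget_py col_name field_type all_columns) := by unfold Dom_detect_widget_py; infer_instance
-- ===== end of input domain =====

-- B replaces A's early-return if-cascade by candidate scoring: a dict lookup for exact names plus
-- suffix/substring rules each contribute a (priority, label) candidate, and the minimum-priority
-- candidate's label is returned (objective: alternative).

-- ===== PORT A =====
def detect_widget_py (col_name : String) (field_type : String) (all_columns : List String) : String :=
  let name := PySem.Str.lower col_name
  if name == "password_hash" || name == "hashed_password" || name == "password_digest" then "password_hash"
  else if name == "password" || name == "passwd" || name == "pwd" || name == "new_password" then "password"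
  else if (["_secret", "_token", "_key", "api_key", "secret_key"].any (fun s => PySem.Str.isIn s name)) && !(name == "is_active" || name == "primary_key") then "secret"
  else if PySem.Str.endswith name "_hash" && !(PySem.Str.isIn "password" name) then "secret"
  else if name == "slug" || PySem.Str.endswith name "_slug" then "slug"
  else if name == "email" || PySem.Str.endswith name "_email" || name == "email_address" then "email"
  else if name == "url" || name == "website" || name == "homepage" || name == "avatar_url" || name == "image_url" || name == "photo_url" then "url"
  else if PySem.Str.endswith name "_url" || PySem.Str.endswith name "_link" then "url"
  else if name == "color" || name == "hex_color" || name == "bg_color" || name == "text_color" || name == "background_color" then "color"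
  else if PySem.Str.endswith name "_color" then "color"
  else if name == "ip_address" || name == "ip" || name == "remote_ip" || name == "client_ip" then "ip"
  else "default"

-- ===== PORT B =====
def pvExact : PySem.Dict String (Int × String) :=
  PySem.Dict.ofList [("password_hash", ((1:Int), "password_hash")), ("hashed_password", ((1:Int), "password_hash")), ("password_digest", ((1:Int), "password_hash")), ("password", ((2:Int), "password")), ("passwd", ((2:Int), "password")), ("pwd", ((2:Int), "password")), ("new_password", ((2:Int), "password")), ("slug", ((5:Int), "slug")), ("email", ((6:Int), "email")), ("email_address", ((6:Int), "email")), ("url", ((7:Int), "url")), ("website", ((7:Int), "url")), ("homepage", ((7:Int), "url")), ("avatar_url", ((7:Int), "url")), ("image_url", ((7:Int), "url")), ("photo_url", ((7:Int), "url")), ("color", ((9:Int), "color")), ("hex_color", ((9:Int), "color")), ("bg_color", ((9:Int), "color")), ("text_color", ((9:Int), "color")), ("background_color", ((9:Int), "color")), ("ip_address", ((11:Int), "ip")), ("ip", ((11:Int), "ip")), ("remote_ip", ((11:Int), "ip")), ("client_ip", ((11:Int), "ip"))]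

def pvSuffix : List (String × Int × String) :=
  [("_slug", 5, "slug"), ("_email", 6, "email"), ("_url", 8, "url"), ("_link", 8, "url"), ("_color", 10, "color")]

def detect_widget_py_alt (col_name : String) (field_type : String) (all_columns : List String) : String :=
  let name := PySem.Str.lower col_name
  let cands : List (Int × String) := []
  let cands := match pvExact.get? name with
    | some hit => cands ++ [hit]
    | none => cands
  let cands := if (["_secret", "_token", "_key", "api_key", "secret_key"].any (fun s => PySem.Str.isIn s name)) && !(name == "is_active" || name == "primary_key") then cands ++ [((3:Int), "secret")] else cands
  let cands := if PySem.Str.endswith name "_hash" && !(PySem.Str.isIn "password" name) then cands ++ [((4:Int), "secret")] else cands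
  let cands := pvSuffix.foldl (fun acc r => if PySem.Str.endswith name r.1 then acc ++ [(r.2.1, r.2.2)] else acc) cands
  match PySem.List.min2? cands (fun c => c.1) (fun c => c.2) with
  | some m => m.2
  | none => "default"

-- ===== PRECONDITION & SPEC =====
def Spec_detect_widget_py (col_name : String) (field_type : String) (all_columns : List String) (out : String) : Prop := out = detect_widget_py_alt col_name field_type all_columns
instance (col_name : String) (field_type : String) (all_columns : List String) (out : String) : Decidable (Spec_detect_widget_py col_name field_type all_columns out) := by unfold Spec_detect_widget_py; infer_instance

-- ===== CLAIM (what is proved, stated in full; the proofs are below) =====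
def Claim_equal_detect_widget_py : Prop := ∀ (col_name : String) (field_type : String) (all_columns : List String), Dom_detect_widget_py col_name field_type all_columns → Spec_detect_widget_py col_name field_type all_columns (detect_widget_py col_name field_type all_columns)

-- ===== LEMMAS AND PROOFS =====

-- ===== VERDICT (by name: the statement is the Claim_ definition above) =====
set_option maxHeartbeats 40000000 in
theorem detect_widget_py_spec : Claim_equal_detect_widget_py := by
  intro col_name field_type all_columns _
  unfold Spec_detect_widget_py
  simp only [detect_widget_py, detect_widget_py_alt]
  generalize PySem.Str.lower col_name = n
  cases hx0 : (n == "password_hash")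
  case true => obtain rfl := eq_of_beq hx0; decide
  cases hx1 : (n == "hashed_password")
  case true => obtain rfl := eq_of_beq hx1; decide
  cases hx2 : (n == "password_digest")
  case true => obtain rfl := eq_of_beq hx2; decide
  cases hx3 : (n == "password")
  case true => obtain rfl := eq_of_beq hx3; decide
  cases hx4 : (n == "passwd")
  case true => obtain rfl := eq_of_beq hx4; decide
  cases hx5 : (n == "pwd")
  case true => obtain rfl := eq_of_beq hx5; decide
  cases hx6 : (n == "new_password")
  case true => obtain rfl := eq_of_beq hx6; decide
  cases hx7 : (n == "slug")
  case true => obtain rfl := eq_of_beq hx7; decide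
  cases hx8 : (n == "email")
  case true => obtain rfl := eq_of_beq hx8; decide
  cases hx9 : (n == "email_address")
  case true => obtain rfl := eq_of_beq hx9; decide
  cases hx10 : (n == "url")
  case true => obtain rfl := eq_of_beq hx10; decide
  cases hx11 : (n == "website")
  case true => obtain rfl := eq_of_beq hx11; decide
  cases hx12 : (n == "homepage")
  case true => obtain rfl := eq_of_beq hx12; decide
  cases hx13 : (n == "avatar_url")
  case true => obtain rfl := eq_of_beq hx13; decide
  cases hx14 : (n == "image_url")
  case true => obtain rfl := eq_of_beq hx14; decide
  cases hx15 : (n == "photo_url")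
  case true => obtain rfl := eq_of_beq hx15; decide
  cases hx16 : (n == "color")
  case true => obtain rfl := eq_of_beq hx16; decide
  cases hx17 : (n == "hex_color")
  case true => obtain rfl := eq_of_beq hx17; decide
  cases hx18 : (n == "bg_color")
  case true => obtain rfl := eq_of_beq hx18; decide
  cases hx19 : (n == "text_color")
  case true => obtain rfl := eq_of_beq hx19; decide
  cases hx20 : (n == "background_color")
  case true => obtain rfl := eq_of_beq hx20; decide
  cases hx21 : (n == "ip_address")
  case true => obtain rfl := eq_of_beq hx21; decide
  cases hx22 : (n == "ip")
  case true => obtain rfl := eq_of_beq hx22; decide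
  cases hx23 : (n == "remote_ip")
  case true => obtain rfl := eq_of_beq hx23; decide
  cases hx24 : (n == "client_ip")
  case true => obtain rfl := eq_of_beq hx24; decide
  have hr0 : ("password_hash" == n) = false := by rw [BEq.comm]; exact hx0
  have hr1 : ("hashed_password" == n) = false := by rw [BEq.comm]; exact hx1
  have hr2 : ("password_digest" == n) = false := by rw [BEq.comm]; exact hx2
  have hr3 : ("password" == n) = false := by rw [BEq.comm]; exact hx3
  have hr4 : ("passwd" == n) = false := by rw [BEq.comm]; exact hx4
  have hr5 : ("pwd" == n) = false := by rw [BEq.comm]; exact hx5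
  have hr6 : ("new_password" == n) = false := by rw [BEq.comm]; exact hx6
  have hr7 : ("slug" == n) = false := by rw [BEq.comm]; exact hx7
  have hr8 : ("email" == n) = false := by rw [BEq.comm]; exact hx8
  have hr9 : ("email_address" == n) = false := by rw [BEq.comm]; exact hx9
  have hr10 : ("url" == n) = false := by rw [BEq.comm]; exact hx10
  have hr11 : ("website" == n) = false := by rw [BEq.comm]; exact hx11
  have hr12 : ("homepage" == n) = false := by rw [BEq.comm]; exact hx12
  have hr13 : ("avatar_url" == n) = false := by rw [BEq.comm]; exact hx13
  have hr14 : ("image_url" == n) = false := by rw [BEq.comm]; exact hx14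
  have hr15 : ("photo_url" == n) = false := by rw [BEq.comm]; exact hx15
  have hr16 : ("color" == n) = false := by rw [BEq.comm]; exact hx16
  have hr17 : ("hex_color" == n) = false := by rw [BEq.comm]; exact hx17
  have hr18 : ("bg_color" == n) = false := by rw [BEq.comm]; exact hx18
  have hr19 : ("text_color" == n) = false := by rw [BEq.comm]; exact hx19
  have hr20 : ("background_color" == n) = false := by rw [BEq.comm]; exact hx20
  have hr21 : ("ip_address" == n) = false := by rw [BEq.comm]; exact hx21
  have hr22 : ("ip" == n) = false := by rw [BEq.comm]; exact hx22
  have hr23 : ("remote_ip" == n) = false := by rw [BEq.comm]; exact hx23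
  have hr24 : ("client_ip" == n) = false := by rw [BEq.comm]; exact hx24
  have hpv : pvExact = PySem.Dict.mk [("password_hash", ((1:Int), "password_hash")), ("hashed_password", ((1:Int), "password_hash")), ("password_digest", ((1:Int), "password_hash")), ("password", ((2:Int), "password")), ("passwd", ((2:Int), "password")), ("pwd", ((2:Int), "password")), ("new_password", ((2:Int), "password")), ("slug", ((5:Int), "slug")), ("email", ((6:Int), "email")), ("email_address", ((6:Int), "email")), ("url", ((7:Int), "url")), ("website", ((7:Int), "url")), ("homepage", ((7:Int), "url")), ("avatar_url", ((7:Int), "url")), ("image_url", ((7:Int), "url")), ("photo_url", ((7:Int), "url")), ("color", ((9:Int), "color")), ("hex_color", ((9:Int), "color")), ("bg_color", ((9:Int), "color")), ("text_color", ((9:Int), "color")), ("background_color", ((9:Int), "color")), ("ip_address", ((11:Int), "ip")), ("ip", ((11:Int), "ip")), ("remote_ip", ((11:Int), "ip")), ("client_ip", ((11:Int), "ip"))] := by decide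
  simp only [hx0, hx1, hx2, hx3, hx4, hx5, hx6, hx7, hx8, hx9, hx10, hx11, hx12, hx13, hx14, hx15, hx16, hx17, hx18, hx19, hx20, hx21, hx22, hx23, hx24, hr0, hr1, hr2, hr3, hr4, hr5, hr6, hr7, hr8, hr9, hr10, hr11, hr12, hr13, hr14, hr15, hr16, hr17, hr18, hr19, hr20, hr21, hr22, hr23, hr24, hpv, PySem.Dict.get?_mk_cons, List.foldl, Bool.false_or, Bool.or_false, Bool.true_or, Bool.or_true, Bool.false_eq_true, reduceIte, Bool.false_or, Bool.or_false, Bool.true_or, Bool.or_true]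
  simp only [PySem.Dict.get?]
  cases hS : ((["_secret", "_token", "_key", "api_key", "secret_key"].any (fun s => PySem.Str.isIn s n)) && !(n == "is_active" || n == "primary_key")) <;>
    cases hH : (PySem.Str.endswith n "_hash" && !(PySem.Str.isIn "password" n)) <;>
    cases e1 : PySem.Str.endswith n "_slug" <;>
    cases e2 : PySem.Str.endswith n "_email" <;>
    cases e3 : PySem.Str.endswith n "_url" <;>
    cases e4 : PySem.Str.endswith n "_link" <;>
    cases e5 : PySem.Str.endswith n "_color" <;>
    (simp only [hS, hH, e1, e2, e3, e4, e5, pvSuffix, List.foldl, Bool.false_or, Bool.or_false, Bool.true_or, Bool.or_true, List.cons_append, List.nil_append, Bool.false_eq_true, ite_true, ite_false, reduceIte]; try rfl)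
  all_goals simp only [List.find?_nil, Option.map_none, List.nil_append]
  all_goals simp [PySem.List.min2?]
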